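-- pv_equiv track=rewrite | github.com/Homin0321/traf | app.py | format_markdown_tables
-- ===== SOURCE A (Python) =====
-- def format_markdown_tables(text):
--     """
--     Formats markdown tables by inserting a header separator line.
--     It identifies tables by looking for consecutive lines with the same number of '|' characters (at least 2).
--     """
--     lines = text.split("\n")
--     new_lines = []
--     i = 0
--     while i < len(lines):
--         line = lines[i]
--         pipe_count = line.count("|")
--
--         if pipe_count >= 2:
--             table_lines_indices = [i]
--             j = i + 1
--             while j < len(lines) and lines[j].count("|") == pipe_count:
--                 table_lines_indices.append(j)
--                 j += 1
--
--             if len(table_lines_indices) > 1: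
--                 # This block is a table.
--                 header_line = lines[i]
--
--                 header_stripped = header_line.strip()
--                 cols = header_stripped.split("|")
--                 if header_stripped.startswith("|"):
--                     cols = cols[1:]
--                 if header_stripped.endswith("|"):
--                     cols = cols[:-1]
--                 num_cols = len(cols)
--
--                 if num_cols > 0:
--                     separator = "|" + " --- |" * num_cols
--
--                     new_lines.append(header_line)
--                     new_lines.append(separator)
--
--                     for k in range(1, len(table_lines_indices)):
--                         new_lines.append(lines[table_lines_indices[k]])
--
--                     i = j
--                     continue
--
--         # If not a table or a single line, just add the line
--         new_lines.append(line)
--         i += 1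
--
--     return "\n".join(new_lines)
-- ===== SOURCE B (Python) =====
-- def _runs(lines):
--     """Group consecutive lines by their '|' count: list of (count, run)."""
--     runs = []
--     for line in lines:
--         c = line.count("|")
--         if runs and runs[-1][0] == c:
--             runs[-1][1].append(line)
--         else:
--             runs.append((c, [line]))
--     return runs
--
--
-- def _emit(c, run):
--     """Render one run: insert a header separator for table runs."""
--     if c >= 2 and len(run) > 1:
--         header = run[0].strip()
--         cols = header.split("|")
--         if header.startswith("|"):
--             cols = cols[1:]
--         if header.endswith("|"):
--             cols = cols[:-1]
--         return [run[0], "|" + " --- |" * len(cols)] + run[1:]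
--     return run
--
--
-- def format_markdown_tables(text):
--     runs = _runs(text.split("\n"))
--     return "\n".join(line for c, run in runs for line in _emit(c, run))
-- ===== Notes on version B (the rewrite author's own statement) =====
-- stated objective: simpler
-- what changed: Replaced A's index-managed nested while loops over line numbers with a groupby-style two-pass decomposition: one fold groups lines into maximal runs of equal pipe-count, a second pass renders each run, inserting the separator after a multi-line table run's header (A's dead num_cols==0 path drops out since stripping preserves the pipe count).
import Mathlib
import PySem

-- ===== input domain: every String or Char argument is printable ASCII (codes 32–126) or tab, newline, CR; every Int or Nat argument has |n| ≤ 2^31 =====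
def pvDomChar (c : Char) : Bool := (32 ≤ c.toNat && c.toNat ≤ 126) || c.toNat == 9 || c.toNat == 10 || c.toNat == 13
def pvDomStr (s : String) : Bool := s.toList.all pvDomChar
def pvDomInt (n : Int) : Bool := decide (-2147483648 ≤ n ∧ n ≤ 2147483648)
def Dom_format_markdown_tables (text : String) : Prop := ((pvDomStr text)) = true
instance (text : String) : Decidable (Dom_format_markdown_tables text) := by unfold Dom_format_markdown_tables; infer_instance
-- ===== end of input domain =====

-- B replaces A's index-juggling nested while loops by a groupby-style decomposition: one pass
-- groups the lines into maximal runs of equal '|'-count, a second pass renders each run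
-- (inserting the separator after a multi-line table run's header); same cost, simpler.

-- ===== PORT A =====

-- line.count("|") on the char-list view of a line (both Pythons compute it verbatim)
def pvCount (l : List Char) : Nat := PySem.Chars.count l ['|']

-- the header-column computation both Pythons share verbatim (strip, split on '|', trim edge pipes)
def pvHeaderCols (line : List Char) : List (List Char) :=
  let hs := PySem.Chars.strip line
  let cols := PySem.Chars.splitOn hs ['|']
  let cols := if PySem.Chars.startswith hs ['|'] then cols.drop 1 else cols
  let cols := if PySem.Chars.endswith hs ['|'] then cols.dropLast else cols
  cols

-- A's outer while loop; the inner while collecting table_lines_indices is the takeWhile scan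
def pvALoop (lines : List (List Char)) : List (List Char) :=
  match lines with
  | [] => []
  | line :: rest =>
    let pc := pvCount line
    if 2 ≤ pc then
      let tbl := rest.takeWhile (fun l => pvCount l == pc)
      if 0 < tbl.length then
        let numCols := (pvHeaderCols line).length
        if 0 < numCols then
          line :: ('|' :: PySem.List.pyRepeat " --- |".toList (numCols : Int)) :: tbl
            ++ pvALoop (rest.drop tbl.length)
        else
          line :: pvALoop rest
      else
        line :: pvALoop rest
    else
      line :: pvALoop rest
termination_by lines.length
decreasing_by
  all_goals simp only [List.length_cons, List.length_drop]; omega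

def format_markdown_tables (text : String) : String :=
  String.ofList (PySem.Chars.join ['\n'] (pvALoop (PySem.Chars.splitOn text.toList ['\n'])))

-- ===== PORT B =====

-- _runs: fold appending each line to the last group or opening a new one
def pvRunStep (runs : List (Nat × List (List Char))) (line : List Char) :
    List (Nat × List (List Char)) :=
  let c := pvCount line
  match runs.getLast? with
  | some g => if g.1 == c then runs.dropLast ++ [(g.1, g.2 ++ [line])] else runs ++ [(c, [line])]
  | none => [(c, [line])]

def pvRuns (lines : List (List Char)) : List (Nat × List (List Char)) :=
  lines.foldl pvRunStep []

-- _emit: render one run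
def pvEmit (g : Nat × List (List Char)) : List (List Char) :=
  if 2 ≤ g.1 ∧ 1 < g.2.length then
    match g.2 with
    | [] => []   -- run[0] of an empty run: unreachable under 1 < len
    | h :: t =>
      h :: ('|' :: PySem.List.pyRepeat " --- |".toList ((pvHeaderCols h).length : Int)) :: t
  else g.2

def format_markdown_tables_alt (text : String) : String :=
  String.ofList (PySem.Chars.join ['\n']
    ((pvRuns (PySem.Chars.splitOn text.toList ['\n'])).flatMap pvEmit))

-- ===== PRECONDITION & SPEC =====
def Spec_format_markdown_tables (text : String) (out : String) : Prop := out = format_markdown_tables_alt text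
instance (text : String) (out : String) : Decidable (Spec_format_markdown_tables text out) := by unfold Spec_format_markdown_tables; infer_instance

-- ===== CLAIM (what is proved, stated in full; the proofs are below) =====
def Claim_equal_format_markdown_tables : Prop := ∀ (text : String), Dom_format_markdown_tables text → Spec_format_markdown_tables text (format_markdown_tables text)

-- ===== LEMMAS AND PROOFS =====

-- recursive characterisation of B's grouping pass: head run, then the rest
def pvRunsRec (lines : List (List Char)) : List (Nat × List (List Char)) :=
  match lines with
  | [] => []
  | l :: ls =>
    (pvCount l, l :: ls.takeWhile (fun x => pvCount x == pvCount l)) ::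
      pvRunsRec (ls.dropWhile (fun x => pvCount x == pvCount l))
termination_by lines.length
decreasing_by
  simp only [List.length_cons]
  exact Nat.lt_succ_of_le (List.length_dropWhile_le _ _)

-- invariant of B's fold: with an open last group (c, rs), the fold extends it with the
-- takeWhile prefix and then produces fresh runs of the remainder
theorem pvFoldl_step (lines : List (List Char)) (acc : List (Nat × List (List Char)))
    (c : Nat) (rs : List (List Char)) :
    lines.foldl pvRunStep (acc ++ [(c, rs)]) =
      acc ++ ((c, rs ++ lines.takeWhile (fun x => pvCount x == c)) ::
        pvRunsRec (lines.dropWhile (fun x => pvCount x == c))) := by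
  induction lines generalizing acc c rs with
  | nil => simp [pvRunsRec]
  | cons l ls ih =>
    simp only [List.foldl_cons]
    by_cases hc : pvCount l = c
    · have hstep : pvRunStep (acc ++ [(c, rs)]) l = acc ++ [(c, rs ++ [l])] := by
        simp [pvRunStep, hc]
      rw [hstep, ih]
      simp [hc]
    · have hstep : pvRunStep (acc ++ [(c, rs)]) l = (acc ++ [(c, rs)]) ++ [(pvCount l, [l])] := by
        simp [pvRunStep, Ne.symm hc]
      rw [hstep, ih (acc ++ [(c, rs)])]
      simp [hc, pvRunsRec]

theorem pvRuns_eq_runsRec (lines : List (List Char)) : pvRuns lines = pvRunsRec lines := by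
  cases lines with
  | nil => simp [pvRuns, pvRunsRec]
  | cons l ls =>
    have h1 : pvRunStep [] l = [] ++ [(pvCount l, [l])] := by simp [pvRunStep]
    rw [pvRuns, List.foldl_cons, h1, pvFoldl_step]
    simp [pvRunsRec]

-- str.count with a single-character needle is List.count (unfolds count.go's fuel recursion)
theorem pvCountGo_eq (c : Char) (fuel : Nat) (l : List Char) (acc : Nat)
    (h : l.length ≤ fuel) : PySem.Chars.count.go [c] fuel l acc = acc + l.count c := by
  induction fuel generalizing l acc with
  | zero =>
    have : l = [] := List.eq_nil_of_length_eq_zero (Nat.le_zero.mp h)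
    subst this; simp [PySem.Chars.count.go]
  | succ n ih =>
    cases l with
    | nil => simp [PySem.Chars.count.go]
    | cons a t =>
      simp only [PySem.Chars.count.go]
      by_cases hc : c = a
      · subst hc
        simp only [List.isPrefixOf, beq_self_eq_true, Bool.true_and, if_pos]
        rw [show List.drop [c].length (c :: t) = t from rfl, ih t (acc + 1) (by simpa using h)]
        simp
        omega
      · have : [c].isPrefixOf (a :: t) = false := by
          simp [List.isPrefixOf]; exact hc
        rw [if_neg (by simp [this])]
        rw [ih t acc (by simpa using Nat.le_of_succ_le_succ h)]
        simp [Ne.symm hc]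

theorem pvCount_eq (l : List Char) : pvCount l = l.count '|' := by
  unfold pvCount PySem.Chars.count
  rw [if_neg (by simp)]
  simpa using pvCountGo_eq '|' l.length l 0 le_rfl

-- splitting on a single character yields count+1 pieces
theorem pvSplitGo_length (c : Char) (fuel : Nat) (l cur : List Char)
    (acc : List (List Char)) (h : l.length ≤ fuel) :
    (PySem.Chars.splitOn.go [c] fuel l cur acc).length = acc.length + 1 + l.count c := by
  induction fuel generalizing l cur acc with
  | zero =>
    have : l = [] := List.eq_nil_of_length_eq_zero (Nat.le_zero.mp h)
    subst this; simp [PySem.Chars.splitOn.go]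
  | succ n ih =>
    cases l with
    | nil => simp [PySem.Chars.splitOn.go]
    | cons a t =>
      simp only [PySem.Chars.splitOn.go]
      by_cases hc : c = a
      · subst hc
        rw [if_pos (by simp [List.isPrefixOf])]
        rw [show List.drop [c].length (c :: t) = t from rfl,
          ih t [] (cur.reverse :: acc) (by simpa using h)]
        simp
        omega
      · rw [if_neg (by simp [List.isPrefixOf]; exact hc)]
        rw [ih t (a :: cur) acc (by simpa using Nat.le_of_succ_le_succ h)]
        simp [Ne.symm hc]

theorem pvSplitOn_length (l : List Char) (c : Char) :
    (PySem.Chars.splitOn l [c]).length = l.count c + 1 := by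
  unfold PySem.Chars.splitOn
  rw [pvSplitGo_length c (l.length + 1) l [] [] (Nat.le_succ _)]
  simp [Nat.add_comm]

-- stripping whitespace does not change the number of '|'
theorem pvCount_strip (l : List Char) : (PySem.Chars.strip l).count '|' = l.count '|' := by
  unfold PySem.Chars.strip PySem.Chars.rstrip PySem.Chars.lstrip
  have key : ∀ s : List Char, (s.dropWhile PySem.Chars.isspace).count '|' = s.count '|' := by
    intro s
    conv_rhs => rw [← List.takeWhile_append_dropWhile (p := PySem.Chars.isspace) (l := s)]
    rw [List.count_append]
    have : (s.takeWhile PySem.Chars.isspace).count '|' = 0 := by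
      rw [List.count_eq_zero]
      intro hmem
      have := List.mem_takeWhile_imp hmem
      simp [PySem.Chars.isspace] at this
    omega
  rw [List.count_reverse, key, List.count_reverse, key]

-- a header line with at least two pipes always yields at least one column (A's dead num_cols == 0 path)
theorem pvNumCols_pos (l : List Char) (h : 2 ≤ pvCount l) : 0 < (pvHeaderCols l).length := by
  rw [pvCount_eq] at h
  have hc : 2 ≤ (PySem.Chars.strip l).count '|' := by rw [pvCount_strip]; exact h
  have hsl := pvSplitOn_length (PySem.Chars.strip l) '|'
  by_cases h1 : PySem.Chars.startswith (PySem.Chars.strip l) ['|'] <;>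
    by_cases h2 : PySem.Chars.endswith (PySem.Chars.strip l) ['|'] <;>
      simp only [pvHeaderCols, h1, h2, if_true, if_false, List.length_dropLast,
        List.length_drop, Bool.false_eq_true] <;> omega

theorem pvDrop_takeWhile_length {α : Type} (p : α → Bool) (ls : List α) :
    ls.drop (ls.takeWhile p).length = ls.dropWhile p := by
  induction ls with
  | nil => rfl
  | cons a t ih =>
    by_cases h : p a <;> simp [h, ih]

-- A passes non-table lines through one by one
theorem pvALoop_low (pre post : List (List Char)) (h : ∀ x ∈ pre, pvCount x < 2) :
    pvALoop (pre ++ post) = pre ++ pvALoop post := by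
  induction pre with
  | nil => simp
  | cons p ps ih =>
    have hp : pvCount p < 2 := h p (by simp)
    rw [List.cons_append, pvALoop, if_neg (by omega)]
    rw [ih (fun x hx => h x (List.mem_cons_of_mem _ hx))]
    rfl

-- the heart of the equivalence: A's loop emits exactly B's rendered runs
theorem pvALoop_eq_emit (lines : List (List Char)) :
    pvALoop lines = (pvRunsRec lines).flatMap pvEmit := by
  induction lines using pvRunsRec.induct with
  | case1 => simp [pvALoop, pvRunsRec]
  | case2 l ls ih =>
    rw [pvRunsRec, List.flatMap_cons, ← ih]
    by_cases h2 : 2 ≤ pvCount l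
    · cases htw : ls.takeWhile (fun x => pvCount x == pvCount l) with
      | nil =>
        have hdweq : ls.dropWhile (fun x => pvCount x == pvCount l) = ls := by
          cases ls with
          | nil => rfl
          | cons a t =>
            rw [List.takeWhile_cons] at htw
            by_cases hb : (pvCount a == pvCount l) = true
            · rw [if_pos hb] at htw; cases htw
            · rw [List.dropWhile_cons, if_neg hb]
        rw [pvALoop]; dsimp only [letFun]
        rw [if_pos h2, htw, if_neg (by simp), pvEmit, if_neg (by simp), hdweq]
        rfl
      | cons a tw' =>
        rw [pvALoop]; dsimp only [letFun]
        rw [if_pos h2, pvDrop_takeWhile_length, htw, if_pos (by simp),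
          if_pos (pvNumCols_pos l h2)]
        rw [pvEmit, if_pos (by exact ⟨h2, by simp⟩)]
    · rw [pvALoop]; dsimp only [letFun]
      rw [if_neg h2]
      have hls : ls = ls.takeWhile (fun x => pvCount x == pvCount l) ++
          ls.dropWhile (fun x => pvCount x == pvCount l) :=
        (List.takeWhile_append_dropWhile ..).symm
      conv_lhs => rw [hls]
      rw [pvALoop_low _ _ ?side]
      · rw [pvEmit, if_neg (by simp; intro hh; omega)]
        simp
      · intro x hx
        have := List.mem_takeWhile_imp hx
        simp only [beq_iff_eq] at this
        omega

-- ===== VERDICT (by name: the statement is the Claim_ definition above) =====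
theorem format_markdown_tables_spec : Claim_equal_format_markdown_tables := by
  intro text _
  unfold Spec_format_markdown_tables format_markdown_tables format_markdown_tables_alt
  rw [pvRuns_eq_runsRec, ← pvALoop_eq_emit]
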